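-- pv_equiv track=rewrite | github.com/Bcapard/snake_lineup_v2 | snake_rules.py | _build_period_to_slots
-- ===== SOURCE A (Python) =====
-- from typing import Dict, List, Iterable, Optional
--
-- NUM_PERIODS = 8
--
-- def _build_period_to_slots(slot_to_periods: Dict[int, List[int]]) -> Dict[int, List[int]]:
--     period_to_slots = {period: [] for period in range(1, NUM_PERIODS + 1)}
--     for slot, periods in slot_to_periods.items():
--         for period in periods:
--             period_to_slots[period].append(slot)
--     for period in period_to_slots:
--         period_to_slots[period] = sorted(period_to_slots[period])
--     return period_to_slots
-- ===== SOURCE B (Python) =====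
-- from typing import Dict, List
--
-- NUM_PERIODS = 8
--
-- def _build_period_to_slots(slot_to_periods: Dict[int, List[int]]) -> Dict[int, List[int]]:
--     # Invert to (period, slot) pairs, sort them ONCE globally, then distribute in
--     # order: each bucket receives its slots already sorted, so no per-bucket sort.
--     pairs = sorted((p, s) for s, ps in slot_to_periods.items() for p in ps)
--     period_to_slots = {p: [] for p in range(1, NUM_PERIODS + 1)}
--     for p, s in pairs:
--         period_to_slots[p].append(s)
--     return period_to_slots
-- ===== Notes on version B (the rewrite author's own statement) =====
-- stated objective: alternative
-- what changed: B inverts the mapping into a flat (period, slot) pair list, sorts it once globally, and distributes the sorted pairs into the pre-keyed dict, so each bucket arrives already sorted and A's per-period sort loop disappears.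
import Mathlib
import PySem

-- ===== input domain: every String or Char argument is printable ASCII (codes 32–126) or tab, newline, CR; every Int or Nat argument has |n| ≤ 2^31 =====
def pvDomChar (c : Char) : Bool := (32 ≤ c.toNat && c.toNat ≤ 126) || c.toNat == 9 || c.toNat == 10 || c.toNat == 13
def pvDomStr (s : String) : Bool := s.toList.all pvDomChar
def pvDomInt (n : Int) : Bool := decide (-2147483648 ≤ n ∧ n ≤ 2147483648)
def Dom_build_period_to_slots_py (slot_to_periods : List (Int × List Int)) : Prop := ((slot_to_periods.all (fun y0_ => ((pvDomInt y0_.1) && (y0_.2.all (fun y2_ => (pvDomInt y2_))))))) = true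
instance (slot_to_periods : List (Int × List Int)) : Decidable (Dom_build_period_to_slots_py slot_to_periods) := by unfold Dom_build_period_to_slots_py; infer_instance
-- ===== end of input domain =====

-- B inverts the mapping into a flat (period, slot) pair list, sorts it once globally, and
-- distributes in order, so each bucket arrives sorted and A's per-period sort loop disappears.

-- ===== PORT A =====
-- period_to_slots = {period: [] for period in range(1, NUM_PERIODS + 1)}
-- for slot, periods in ...: for period in periods: period_to_slots[period].append(slot)
-- for period in period_to_slots: period_to_slots[period] = sorted(period_to_slots[period])
-- (Dict.modify with default [] is exact on Pre_, where every period key exists.)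
def build_period_to_slots_py (slot_to_periods : List (Int × List Int)) : List (Int × List Int) :=
  let pts0 : PySem.Dict Int (List Int) :=
    (PySem.List.pyRange 1 (8 + 1) 1).foldl (fun acc p => acc.insert p ([] : List Int)) PySem.Dict.empty
  let pts1 : PySem.Dict Int (List Int) :=
    slot_to_periods.foldl
      (fun acc sp => sp.2.foldl (fun a2 period => a2.modify period [] (fun l => l ++ [sp.1])) acc) pts0
  let pts2 : PySem.Dict Int (List Int) :=
    pts1.keys.foldl (fun acc period => acc.insert period (PySem.List.sorted (acc.getD period []) (fun x => x) false)) pts1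
  pts2.items

-- ===== PORT B =====
-- pairs = sorted((p, s) for s, ps in slot_to_periods.items() for p in ps)
-- period_to_slots = {p: [] for p in range(1, NUM_PERIODS + 1)}
-- for p, s in pairs: period_to_slots[p].append(s)
-- (sorted on int 2-tuples is sorted2 by first then second component;
--  Dict.modify with default [] is exact on Pre_, where every period key exists.)
def build_period_to_slots_py_alt (slot_to_periods : List (Int × List Int)) : List (Int × List Int) :=
  let pairs : List (Int × Int) :=
    slot_to_periods.flatMap (fun sp => sp.2.map (fun p => (p, sp.1)))
  let spairs : List (Int × Int) := PySem.List.sorted2 pairs (fun t => t.1) (fun t => t.2) false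
  let out0 : PySem.Dict Int (List Int) :=
    (PySem.List.pyRange 1 (8 + 1) 1).foldl (fun acc p => acc.insert p ([] : List Int)) PySem.Dict.empty
  let out : PySem.Dict Int (List Int) :=
    spairs.foldl (fun acc t => acc.modify t.1 [] (fun v => v ++ [t.2])) out0
  out.items

-- ===== PRECONDITION & SPEC =====
-- Pre_ excludes exactly the inputs on which A raises KeyError: some listed period outside 1..8.
def Pre_build_period_to_slots_py (slot_to_periods : List (Int × List Int)) : Prop :=
  ∀ sp ∈ slot_to_periods, ∀ q ∈ sp.2, 1 ≤ q ∧ q ≤ 8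
instance (slot_to_periods : List (Int × List Int)) : Decidable (Pre_build_period_to_slots_py slot_to_periods) := by unfold Pre_build_period_to_slots_py; infer_instance

def pvWitness_build_period_to_slots_py : (List (Int × List Int)) := [(3, [1, 1, 2]), (-1, [2, 8])]

def Spec_build_period_to_slots_py (slot_to_periods : List (Int × List Int)) (out : List (Int × List Int)) : Prop := out = build_period_to_slots_py_alt slot_to_periods
instance (slot_to_periods : List (Int × List Int)) (out : List (Int × List Int)) : Decidable (Spec_build_period_to_slots_py slot_to_periods out) := by unfold Spec_build_period_to_slots_py; infer_instance

-- ===== CLAIM (what is proved, stated in full; the proofs are below) =====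
def Claim_equal_build_period_to_slots_py : Prop := ∀ (slot_to_periods : List (Int × List Int)), Dom_build_period_to_slots_py slot_to_periods → Pre_build_period_to_slots_py slot_to_periods → Spec_build_period_to_slots_py slot_to_periods (build_period_to_slots_py slot_to_periods)

-- ===== LEMMAS AND PROOFS =====

-- the slots B collects for period p (definitionally B's generator)
def pvCollect (l : List (Int × List Int)) (p : Int) : List Int :=
  l.flatMap (fun sp => sp.2.filterMap (fun q => if q = p then some sp.1 else none))

-- inner fill loop of A: effect on a lookup
lemma inner_getD (s : Int) : ∀ (qs : List Int) (a : PySem.Dict Int (List Int)) (p : Int),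
    (qs.foldl (fun a2 q => a2.modify q [] (fun l => l ++ [s])) a).getD p []
      = a.getD p [] ++ qs.filterMap (fun q => if q = p then some s else none) := by
  intro qs
  induction qs with
  | nil => intro a p; simp
  | cons q qs ih =>
    intro a p
    simp only [List.foldl_cons, List.filterMap_cons, ih]
    by_cases h : q = p
    · subst h; simp [PySem.Dict.getD_modify_self]
    · simp [h, PySem.Dict.getD_modify, Ne.symm h]

-- inner fill loop: keys unchanged when every period is already a key
lemma inner_keys (s : Int) : ∀ (qs : List Int) (a : PySem.Dict Int (List Int)),
    (∀ q ∈ qs, a.contains q = true) →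
    (qs.foldl (fun a2 q => a2.modify q [] (fun l => l ++ [s])) a).keys = a.keys := by
  intro qs
  induction qs with
  | nil => intro a _; rfl
  | cons q qs ih =>
    intro a h
    have hq : a.contains q = true := h q (by simp)
    have hkeys : (a.modify q [] (fun l => l ++ [s])).keys = a.keys := by
      rw [PySem.Dict.keys_modify]
      exact PySem.Dict.keys_insert_of_contains a _ hq
    simp only [List.foldl_cons]
    rw [ih _ (fun r hr => by
      rw [PySem.Dict.contains_iff_mem_keys, hkeys, ← PySem.Dict.contains_iff_mem_keys]
      exact h r (by simp [hr]))]
    exact hkeys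

-- outer fill loop of A
lemma fill_getD : ∀ (l : List (Int × List Int)) (a : PySem.Dict Int (List Int)) (p : Int),
    (l.foldl (fun acc sp => sp.2.foldl (fun a2 q => a2.modify q [] (fun v => v ++ [sp.1])) acc) a).getD p []
      = a.getD p [] ++ pvCollect l p := by
  intro l
  induction l with
  | nil => intro a p; simp [pvCollect]
  | cons sp rest ih =>
    intro a p
    simp only [List.foldl_cons, pvCollect, List.flatMap_cons] at *
    rw [ih, inner_getD]
    simp [List.append_assoc]

lemma fill_keys : ∀ (l : List (Int × List Int)) (a : PySem.Dict Int (List Int)),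
    (∀ sp ∈ l, ∀ q ∈ sp.2, a.contains q = true) →
    (l.foldl (fun acc sp => sp.2.foldl (fun a2 q => a2.modify q [] (fun v => v ++ [sp.1])) acc) a).keys = a.keys := by
  intro l
  induction l with
  | nil => intro a _; rfl
  | cons sp rest ih =>
    intro a h
    have h1 : (sp.2.foldl (fun a2 q => a2.modify q [] (fun v => v ++ [sp.1])) a).keys = a.keys :=
      inner_keys sp.1 sp.2 a (h sp (by simp))
    simp only [List.foldl_cons]
    rw [ih _ (fun r hr q hq => by
      rw [PySem.Dict.contains_iff_mem_keys, h1, ← PySem.Dict.contains_iff_mem_keys]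
      exact h r (by simp [hr]) q hq)]
    exact h1

-- final rewriting loop of A over (nodup) keys already present in the dict
lemma rewrite_loop (f : List Int → List Int) :
    ∀ (ks : List Int) (a : PySem.Dict Int (List Int)), ks.Nodup → (∀ k ∈ ks, a.contains k = true) →
    (ks.foldl (fun acc p => acc.insert p (f (acc.getD p []))) a).keys = a.keys ∧
    ∀ p, (ks.foldl (fun acc p => acc.insert p (f (acc.getD p []))) a).getD p []
          = if p ∈ ks then f (a.getD p []) else a.getD p [] := by
  intro ks
  induction ks with
  | nil => intro a _ _; exact ⟨rfl, fun p => by simp⟩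
  | cons k ks ih =>
    intro a hnd h
    have hk : a.contains k = true := h k (by simp)
    have hknotin : k ∉ ks := (List.nodup_cons.mp hnd).1
    set a' := a.insert k (f (a.getD k [])) with ha'
    have hkeys' : a'.keys = a.keys := PySem.Dict.keys_insert_of_contains a _ hk
    have hcont : ∀ r ∈ ks, a'.contains r = true := by
      intro r hr
      rw [PySem.Dict.contains_iff_mem_keys, hkeys', ← PySem.Dict.contains_iff_mem_keys]
      exact h r (by simp [hr])
    obtain ⟨ihk, ihg⟩ := ih a' (List.nodup_cons.mp hnd).2 hcont
    constructor
    · simp only [List.foldl_cons]; rw [ihk, hkeys']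
    · intro p
      simp only [List.foldl_cons]
      rw [ihg p]
      by_cases hp : p ∈ ks
      · have hpk : p ≠ k := fun e => hknotin (e ▸ hp)
        simp [hp, ha', PySem.Dict.getD_insert, hpk]
      · by_cases hpk : p = k
        · subst hpk; simp [hp, ha']
        · simp [hp, hpk, ha', PySem.Dict.getD_insert]

-- lexicographic ≤ on int pairs: Python's tuple order, which sorted(pairs) uses
def pvLexLe (a b : Int × Int) : Prop := a.1 < b.1 ∨ (a.1 = b.1 ∧ a.2 ≤ b.2)

-- sorted2's comparator keeps lists pairwise-lex-ordered under insertion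
lemma insertBy_lex_pairwise (x : Int × Int) :
    ∀ (ys : List (Int × Int)), ys.Pairwise pvLexLe →
    (PySem.List.insertBy (fun a b => decide (a.1 < b.1) || (!decide (b.1 < a.1) && decide (a.2 < b.2))) x ys).Pairwise pvLexLe := by
  intro ys
  induction ys with
  | nil => intro _; simp [PySem.List.insertBy, pvLexLe]
  | cons y ys ih =>
    intro h
    rw [show PySem.List.insertBy (fun a b => decide (a.1 < b.1) || (!decide (b.1 < a.1) && decide (a.2 < b.2))) x (y :: ys)
        = if (decide (x.1 < y.1) || (!decide (y.1 < x.1) && decide (x.2 < y.2))) then x :: y :: ys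
          else y :: PySem.List.insertBy (fun a b => decide (a.1 < b.1) || (!decide (b.1 < a.1) && decide (a.2 < b.2))) x ys from rfl]
    rcases List.pairwise_cons.mp h with ⟨hy, hys⟩
    split_ifs with hb
    · have hxy : pvLexLe x y := by
        simp only [Bool.or_eq_true, Bool.and_eq_true, Bool.not_eq_true', decide_eq_true_eq, decide_eq_false_iff_not] at hb
        unfold pvLexLe; omega
    -- x before y: x relates to y and (via y) to everything after it
      refine List.pairwise_cons.mpr ⟨?_, h⟩
      intro z hz
      rcases List.mem_cons.mp hz with rfl | hz'
      · exact hxy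
      · have hyz := hy z hz'
        unfold pvLexLe at *; omega
    · have hyx : pvLexLe y x := by
        simp only [Bool.or_eq_true, Bool.and_eq_true, Bool.not_eq_true', decide_eq_true_eq, decide_eq_false_iff_not, not_or, not_and] at hb
        unfold pvLexLe; omega
      refine List.pairwise_cons.mpr ⟨?_, ih hys⟩
      intro z hz
      rcases (PySem.List.mem_insertBy _ x z ys).mp hz with rfl | hz'
      · exact hyx
      · exact hy z hz'

-- sorted2 with the identity tuple key produces a pairwise-lex-ordered list
lemma sorted2_lex_pairwise (ts : List (Int × Int)) :
    (PySem.List.sorted2 ts (fun t => t.1) (fun t => t.2) false).Pairwise pvLexLe := by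
  have aux : ∀ (us : List (Int × Int)) (acc : List (Int × Int)), acc.Pairwise pvLexLe →
      (us.foldl (fun acc x => PySem.List.insertBy (fun a b => decide (a.1 < b.1) || (!decide (b.1 < a.1) && decide (a.2 < b.2))) x acc) acc).Pairwise pvLexLe := by
    intro us
    induction us with
    | nil => intro acc h; exact h
    | cons u us ih => intro acc h; exact ih _ (insertBy_lex_pairwise u acc h)
  exact aux ts [] (by simp)

-- B's distribution loop over the sorted pair list: effect on a lookup
lemma pfill_getD : ∀ (ts : List (Int × Int)) (a : PySem.Dict Int (List Int)) (p : Int),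
    (ts.foldl (fun a2 t => a2.modify t.1 [] (fun v => v ++ [t.2])) a).getD p []
      = a.getD p [] ++ ts.filterMap (fun t => if t.1 = p then some t.2 else none) := by
  intro ts
  induction ts with
  | nil => intro a p; simp
  | cons t ts ih =>
    intro a p
    simp only [List.foldl_cons, List.filterMap_cons, ih]
    by_cases h : t.1 = p
    · rw [h]; simp [PySem.Dict.getD_modify_self]
    · simp [h, PySem.Dict.getD_modify, Ne.symm h]

-- B's distribution loop: keys unchanged when every period is already a key
lemma pfill_keys : ∀ (ts : List (Int × Int)) (a : PySem.Dict Int (List Int)),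
    (∀ t ∈ ts, a.contains t.1 = true) →
    (ts.foldl (fun a2 t => a2.modify t.1 [] (fun v => v ++ [t.2])) a).keys = a.keys := by
  intro ts
  induction ts with
  | nil => intro a _; rfl
  | cons t ts ih =>
    intro a h
    have ht : a.contains t.1 = true := h t (by simp)
    have hkeys : (a.modify t.1 [] (fun v => v ++ [t.2])).keys = a.keys := by
      rw [PySem.Dict.keys_modify]
      exact PySem.Dict.keys_insert_of_contains a _ ht
    simp only [List.foldl_cons]
    rw [ih _ (fun r hr => by
      rw [PySem.Dict.contains_iff_mem_keys, hkeys, ← PySem.Dict.contains_iff_mem_keys]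
      exact h r (by simp [hr]))]
    exact hkeys

-- A's per-bucket sort equals B's slice of the globally sorted pair list
lemma bucket_eq (l : List (Int × List Int)) (p : Int) :
    PySem.List.sorted (pvCollect l p) (fun x => x) false
      = (PySem.List.sorted2 (l.flatMap (fun sp => sp.2.map (fun q => (q, sp.1)))) (fun t => t.1) (fun t => t.2) false).filterMap
          (fun t => if t.1 = p then some t.2 else none) := by
  set pairs := l.flatMap (fun sp => sp.2.map (fun q => (q, sp.1))) with hpairs
  set spairs := PySem.List.sorted2 pairs (fun t => t.1) (fun t => t.2) false with hsp
  have hperm : (spairs.filterMap (fun t => if t.1 = p then some t.2 else none)).Perm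
      (pairs.filterMap (fun t => if t.1 = p then some t.2 else none)) :=
    (PySem.List.sorted2_perm pairs _ _ false).filterMap _
  have hcoll : pairs.filterMap (fun t => if t.1 = p then some t.2 else none) = pvCollect l p := by
    rw [hpairs]
    simp [pvCollect, List.filterMap_flatMap, List.filterMap_map]
  have hpw : (spairs.filterMap (fun t => if t.1 = p then some t.2 else none)).Pairwise (fun a b => a ≤ b) := by
    refine List.Pairwise.filterMap _ ?_ (sorted2_lex_pairwise pairs)
    intro a a' hle b hb b' hb'
    by_cases h1 : a.1 = p
    · by_cases h2 : a'.1 = p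
      · simp only [h1, h2] at hb hb'
        cases hb; cases hb'
        unfold pvLexLe at hle; omega
      · simp [h2] at hb'
    · simp [h1] at hb
  exact PySem.List.sorted_id_eq_of_perm_of_pairwise _ _ (hcoll ▸ hperm) hpw

-- ===== VERDICT (by name: the statement is the Claim_ definition above) =====
theorem build_period_to_slots_py_spec : Claim_equal_build_period_to_slots_py := by
  intro l _ hpre
  unfold Spec_build_period_to_slots_py
  simp only [build_period_to_slots_py, build_period_to_slots_py_alt]
  set pts0 : PySem.Dict Int (List Int) :=
    (PySem.List.pyRange 1 (8 + 1) 1).foldl (fun acc p => acc.insert p ([] : List Int)) PySem.Dict.empty with hpts0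
  set pts1 : PySem.Dict Int (List Int) :=
    l.foldl (fun acc sp => sp.2.foldl (fun a2 period => a2.modify period [] (fun v => v ++ [sp.1])) acc) pts0 with hpts1
  have hnd : (PySem.List.pyRange 1 (8 + 1) 1).Nodup := PySem.List.nodup_pyRange_one 1 9
  have hmk : pts0 = ⟨[(1, []), (2, []), (3, []), (4, []), (5, []), (6, []), (7, []), (8, [])]⟩ := by decide
  have hkeys0 : pts0.keys = PySem.List.pyRange 1 (8 + 1) 1 := by rw [hmk]; decide
  have hg0 : ∀ p, pts0.getD p [] = [] := by
    intro p
    rw [hmk]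
    simp only [PySem.Dict.getD_eq_get?_getD, PySem.Dict.get?_mk_cons]
    split_ifs <;> rfl
  have hcont0 : ∀ sp ∈ l, ∀ q ∈ sp.2, pts0.contains q = true := by
    intro sp hsp q hq
    rw [PySem.Dict.contains_iff_mem_keys, hkeys0, PySem.List.mem_pyRange_one]
    have := hpre sp hsp q hq
    omega
  have hkeys1 : pts1.keys = PySem.List.pyRange 1 (8 + 1) 1 := by
    rw [hpts1, fill_keys l pts0 hcont0, hkeys0]
  have hg1 : ∀ p, pts1.getD p [] = pvCollect l p := by
    intro p; rw [hpts1, fill_getD, hg0]; rfl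
  have hcontks : ∀ k ∈ pts1.keys, pts1.contains k = true := by
    intro k hk; rw [PySem.Dict.contains_iff_mem_keys]; exact hk
  obtain ⟨hk2, hg2⟩ := rewrite_loop (fun v => PySem.List.sorted v (fun x => x) false)
    pts1.keys pts1 (hkeys1 ▸ hnd) hcontks
  set pts2 := pts1.keys.foldl
    (fun acc period => acc.insert period (PySem.List.sorted (acc.getD period []) (fun x => x) false)) pts1 with hpts2
  have hk2' : pts2.keys = PySem.List.pyRange 1 (8 + 1) 1 := by rw [hpts2, hk2, hkeys1]
  -- B's side
  set pairs := l.flatMap (fun sp => sp.2.map (fun q => (q, sp.1))) with hpairs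
  set spairs := PySem.List.sorted2 pairs (fun t => t.1) (fun t => t.2) false with hsp
  have hcontsp : ∀ t ∈ spairs, pts0.contains t.1 = true := by
    intro t ht
    have htp : t ∈ pairs := (PySem.List.sorted2_perm pairs _ _ false).mem_iff.mp ht
    rw [hpairs] at htp
    simp only [List.mem_flatMap, List.mem_map] at htp
    obtain ⟨sp, hsp', q, hq, rfl⟩ := htp
    exact hcont0 sp hsp' q hq
  set out := spairs.foldl (fun acc t => acc.modify t.1 [] (fun v => v ++ [t.2])) pts0 with hout
  have hkout : out.keys = PySem.List.pyRange 1 (8 + 1) 1 := by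
    rw [hout, pfill_keys spairs pts0 hcontsp, hkeys0]
  have hgout : ∀ p, out.getD p [] = spairs.filterMap (fun t => if t.1 = p then some t.2 else none) := by
    intro p; rw [hout, pfill_getD, hg0]; rfl
  rw [PySem.Dict.items_eq_map_keys pts2 (hk2' ▸ hnd) [], hk2',
      PySem.Dict.items_eq_map_keys out (hkout ▸ hnd) [], hkout]
  refine List.map_congr_left ?_
  intro p hp
  have h2 := hg2 p
  rw [hkeys1] at h2
  rw [h2, if_pos hp, hg1, hgout p, bucket_eq l p]
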